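-- pv_equiv track=rewrite | github.com/lusokol/gomoku-42 | srcs/game.py | evaluate_capture_risk
-- ===== SOURCE A (Python) =====
-- def evaluate_capture_risk(board, symbol, opponent_captures):
--     opponent = "1" if symbol == "2" else "2"
--     risk_score = 0
--
--     # Table of risk scores depending on how many captures the opponent has made
--     capture_risk_scores = [150, 500, 2000, 6000, 999999]
--
--     if opponent_captures >= len(capture_risk_scores):
--         score_from_table = capture_risk_scores[-1]
--     else:
--         score_from_table = capture_risk_scores[opponent_captures]
--
--     directions = [
--         (1, 0),
--         (0, 1),
--         (1, 1),
--         (1, -1),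
--     ]
--
--     for r in range(len(board)):
--         for c in range(len(board[0])):
--             if board[r][c] != symbol:
--                 continue
--
--             for dr, dc in directions:
--                 try:
--                     #Player - AI - AI - empty
--                     r0, c0 = r - dr, c - dc
--                     r1, c1 = r, c
--                     r2, c2 = r + dr, c + dc
--                     r3, c3 = r + 2*dr, c + 2*dc
--
--                     if all(0 <= x < len(board) and 0 <= y < len(board[0])
--                         for x, y in [(r0, c0), (r2, c2), (r3, c3)]):
--                         if (board[r0][c0] == opponent and
--                             board[r2][c2] == symbol and
--                             board[r3][c3] == "."):
--                             risk_score += score_from_table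
--
--                     # empty - AI - AI - Player
--                     r0, c0 = r - 2*dr, c - 2*dc
--                     r1, c1 = r - dr, c - dc
--                     r2, c2 = r, c
--                     r3, c3 = r + dr, c + dc
--
--                     if all(0 <= x < len(board) and 0 <= y < len(board[0])
--                         for x, y in [(r0, c0), (r1, c1), (r3, c3)]):
--                         if (board[r0][c0] == "." and
--                             board[r1][c1] == symbol and
--                             board[r3][c3] == opponent):
--                             risk_score += score_from_table
--                 except IndexError:
--                     continue
--     return risk_score
-- ===== SOURCE B (Python) =====
-- def evaluate_capture_risk(board, symbol, opponent_captures):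
--     opponent = "1" if symbol == "2" else "2"
--     capture_risk_scores = [150, 500, 2000, 6000, 999999]
--     if opponent_captures >= len(capture_risk_scores):
--         score = capture_risk_scores[-1]
--     else:
--         score = capture_risk_scores[opponent_captures]
--
--     h = len(board)
--     w = len(board[0]) if board else 0
--     risky = ((opponent, symbol, symbol, "."), (".", symbol, symbol, opponent))
--
--     hits = 0
--     for dr, dc in ((1, 0), (0, 1), (1, 1), (1, -1)):
--         r_hi = h - 3 * dr
--         c_lo, c_hi = (3, w) if dc < 0 else (0, w - 3 * dc)
--         for r in range(r_hi):
--             for c in range(c_lo, c_hi):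
--                 window = tuple(board[r + k * dr][c + k * dc] for k in range(4))
--                 if window in risky:
--                     hits += 1
--     return hits * score
-- ===== Notes on version B (the rewrite author's own statement) =====
-- stated objective: simpler
-- what changed: A scans every cell equal to `symbol` and probes two separately bounds-checked lookbehind/lookahead windows per direction inside a try/except; B instead enumerates every in-bounds 4-cell window once per direction over precomputed index ranges (no per-window bounds test, no exception handling), counts windows matching either risky pattern, and multiplies the count by the table score once at the end.
import Mathlib
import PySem

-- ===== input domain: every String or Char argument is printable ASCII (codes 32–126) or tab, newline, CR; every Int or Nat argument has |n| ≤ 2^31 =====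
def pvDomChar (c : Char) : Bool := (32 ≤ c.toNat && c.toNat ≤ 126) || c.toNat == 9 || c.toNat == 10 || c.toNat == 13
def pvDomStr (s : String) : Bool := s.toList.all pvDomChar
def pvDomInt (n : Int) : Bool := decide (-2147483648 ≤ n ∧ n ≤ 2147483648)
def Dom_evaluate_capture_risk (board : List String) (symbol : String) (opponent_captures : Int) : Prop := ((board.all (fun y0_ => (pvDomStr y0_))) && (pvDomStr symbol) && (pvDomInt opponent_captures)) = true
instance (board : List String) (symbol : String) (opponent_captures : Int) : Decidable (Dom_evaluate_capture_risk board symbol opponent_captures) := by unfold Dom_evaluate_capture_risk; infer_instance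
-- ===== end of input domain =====

-- B replaces A's per-symbol-cell scan (with guarded lookbehind windows and try/except) by a direct
-- enumeration of all in-bounds 4-windows per direction over precomputed index ranges, counting risky
-- patterns and multiplying by the table score once at the end (objective: simpler; return value only).

-- ===== PORT A =====
-- board[x][y] as the 1-character string Python slices out; the .getD "" default is unreachable on
-- admitted inputs (out-of-range access is an IndexError, excluded by Pre_ / by A's bounds checks).
def pvCell (board : List String) (x y : Int) : String :=
  ((PySem.List.pyGet? board x).bind (fun row => (PySem.Str.pyGet? row y).map String.singleton)).getD ""

-- len(board[i]); the .getD 0 default is unreachable where A evaluates it (board is nonempty there).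
def pvRowLen (board : List String) (i : Int) : Int :=
  ((PySem.List.pyGet? board i).map PySem.Str.len).getD 0

def evaluate_capture_risk (board : List String) (symbol : String) (opponent_captures : Int) : Int :=
  let opponent : String := if symbol == "2" then "1" else "2"
  let capture_risk_scores : List Int := [150, 500, 2000, 6000, 999999]
  let score_from_table : Int :=
    if opponent_captures ≥ (capture_risk_scores.length : Int) then
      (PySem.List.pyGet? capture_risk_scores (-1)).getD 0
    else
      -- capture_risk_scores[opponent_captures]: IndexError for opponent_captures < -5, excluded by Pre_
      (PySem.List.pyGet? capture_risk_scores opponent_captures).getD 0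
  let directions : List (Int × Int) := [(1, 0), (0, 1), (1, 1), (1, -1)]
  (PySem.List.pyRange 0 (board.length : Int)).foldl (fun risk_score r =>
    (PySem.List.pyRange 0 (pvRowLen board 0)).foldl (fun risk_score c =>
      if pvCell board r c != symbol then risk_score   -- continue
      else
        directions.foldl (fun risk_score d =>
          -- Player - AI - AI - empty   (under Pre_ the try body raises no IndexError)
          let risk_score :=
            if [(r - d.1, c - d.2), (r + d.1, c + d.2), (r + 2*d.1, c + 2*d.2)].all
                 (fun p => decide (0 ≤ p.1 ∧ p.1 < (board.length : Int) ∧ 0 ≤ p.2 ∧ p.2 < pvRowLen board 0)) then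
              if pvCell board (r - d.1) (c - d.2) == opponent
                  && pvCell board (r + d.1) (c + d.2) == symbol
                  && pvCell board (r + 2*d.1) (c + 2*d.2) == "." then
                risk_score + score_from_table
              else risk_score
            else risk_score
          -- empty - AI - AI - Player
          if [(r - 2*d.1, c - 2*d.2), (r - d.1, c - d.2), (r + d.1, c + d.2)].all
               (fun p => decide (0 ≤ p.1 ∧ p.1 < (board.length : Int) ∧ 0 ≤ p.2 ∧ p.2 < pvRowLen board 0)) then
            if pvCell board (r - 2*d.1) (c - 2*d.2) == "."
                && pvCell board (r - d.1) (c - d.2) == symbol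
                && pvCell board (r + d.1) (c + d.2) == opponent then
              risk_score + score_from_table
            else risk_score
          else risk_score) risk_score) risk_score) 0

-- ===== PORT B =====
def evaluate_capture_risk_alt (board : List String) (symbol : String) (opponent_captures : Int) : Int :=
  let opponent : String := if symbol == "2" then "1" else "2"
  let capture_risk_scores : List Int := [150, 500, 2000, 6000, 999999]
  let score : Int :=
    if opponent_captures ≥ (capture_risk_scores.length : Int) then
      (PySem.List.pyGet? capture_risk_scores (-1)).getD 0
    else
      (PySem.List.pyGet? capture_risk_scores opponent_captures).getD 0
  let h : Int := (board.length : Int)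
  let w : Int := match board with | [] => 0 | row :: _ => PySem.Str.len row
  let risky : List (String × String × String × String) :=
    [(opponent, symbol, symbol, "."), (".", symbol, symbol, opponent)]
  let dirs : List (Int × Int) := [(1, 0), (0, 1), (1, 1), (1, -1)]
  let hits : Int := dirs.foldl (fun hits d =>
    let r_hi : Int := h - 3 * d.1
    let c_lo : Int := if d.2 < 0 then 3 else 0
    let c_hi : Int := if d.2 < 0 then w else w - 3 * d.2
    (PySem.List.pyRange 0 r_hi).foldl (fun hits r =>
      (PySem.List.pyRange c_lo c_hi).foldl (fun hits c =>
        let window := (pvCell board r c, pvCell board (r + d.1) (c + d.2),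
                       pvCell board (r + 2*d.1) (c + 2*d.2), pvCell board (r + 3*d.1) (c + 3*d.2))
        if risky.contains window then hits + 1 else hits) hits) hits) 0
  hits * score

-- ===== PRECONDITION & SPEC =====
-- Pre_ excludes exactly the inputs on which A raises IndexError: opponent_captures below -5
-- (capture_risk_scores[opponent_captures]) and boards with a row shorter than row 0 (board[r][c]).
def Pre_evaluate_capture_risk (board : List String) (symbol : String) (opponent_captures : Int) : Prop :=
  -5 ≤ opponent_captures ∧ ∀ row ∈ board, PySem.Str.len (board.headD "") ≤ PySem.Str.len row
instance (board : List String) (symbol : String) (opponent_captures : Int) : Decidable (Pre_evaluate_capture_risk board symbol opponent_captures) := by unfold Pre_evaluate_capture_risk; infer_instance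

def pvWitness_evaluate_capture_risk : List String × String × Int := (["1220", "2...", ".2.1", "...."], "2", 0)

def Spec_evaluate_capture_risk (board : List String) (symbol : String) (opponent_captures : Int) (out : Int) : Prop := out = evaluate_capture_risk_alt board symbol opponent_captures
instance (board : List String) (symbol : String) (opponent_captures : Int) (out : Int) : Decidable (Spec_evaluate_capture_risk board symbol opponent_captures out) := by unfold Spec_evaluate_capture_risk; infer_instance

-- ===== CLAIM (what is proved, stated in full; the proofs are below) =====
def Claim_equal_evaluate_capture_risk : Prop := ∀ (board : List String) (symbol : String) (opponent_captures : Int), Dom_evaluate_capture_risk board symbol opponent_captures → Pre_evaluate_capture_risk board symbol opponent_captures → Spec_evaluate_capture_risk board symbol opponent_captures (evaluate_capture_risk board symbol opponent_captures)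

-- ===== LEMMAS AND PROOFS =====

-- the risk contribution of one 4-window: anchor (r,c), direction (dr,dc), expected pattern p0 p1 p2 p3
def pvF (board : List String) (h w : Int) (p0 p1 p2 p3 : String) (score dr dc r c : Int) : Int :=
  if decide (0 ≤ r ∧ r < h ∧ 0 ≤ c ∧ c < w)
      && decide (0 ≤ r + dr ∧ r + dr < h ∧ 0 ≤ c + dc ∧ c + dc < w)
      && decide (0 ≤ r + 2*dr ∧ r + 2*dr < h ∧ 0 ≤ c + 2*dc ∧ c + 2*dc < w)
      && decide (0 ≤ r + 3*dr ∧ r + 3*dr < h ∧ 0 ≤ c + 3*dc ∧ c + 3*dc < w)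
      && (pvCell board r c == p0) && (pvCell board (r + dr) (c + dc) == p1)
      && (pvCell board (r + 2*dr) (c + 2*dc) == p2) && (pvCell board (r + 3*dr) (c + 3*dc) == p3)
    then score else 0

def pvP1 (board : List String) (h w : Int) (opp sym : String) (score dr dc r c : Int) : Int :=
  pvF board h w opp sym sym "." score dr dc r c
def pvP2 (board : List String) (h w : Int) (opp sym : String) (score dr dc r c : Int) : Int :=
  pvF board h w "." sym sym opp score dr dc r c

def pvDirTerm (board : List String) (h w : Int) (opp sym : String) (score : Int)
    (d : Int × Int) (r c : Int) : Int :=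
  pvP1 board h w opp sym score d.1 d.2 (r - d.1) (c - d.2)
  + pvP2 board h w opp sym score d.1 d.2 (r - 2*d.1) (c - 2*d.2)

def pvGA (board : List String) (h w : Int) (opp sym : String) (score : Int) (r c : Int) : Int :=
  (([(1, 0), (0, 1), (1, 1), (1, -1)] : List (Int × Int)).map
    (fun d => pvDirTerm board h w opp sym score d r c)).sum

def pvSum (a b : Int) (f : Int → Int) : Int := ((PySem.List.pyRange a b).map f).sum
def pvSum2 (rhi clo chi : Int) (f : Int → Int → Int) : Int :=
  pvSum 0 rhi (fun r => pvSum clo chi (fun c => f r c))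

-- the canonical value both ports are reduced to
def pvCanon (board : List String) (h w : Int) (opp sym : String) (score : Int) : Int :=
  (pvSum2 h 0 w (pvP1 board h w opp sym score 1 0) + pvSum2 h 0 w (pvP2 board h w opp sym score 1 0))
  + ((pvSum2 h 0 w (pvP1 board h w opp sym score 0 1) + pvSum2 h 0 w (pvP2 board h w opp sym score 0 1))
  + ((pvSum2 h 0 w (pvP1 board h w opp sym score 1 1) + pvSum2 h 0 w (pvP2 board h w opp sym score 1 1))
  + (pvSum2 h 0 w (pvP1 board h w opp sym score 1 (-1)) + pvSum2 h 0 w (pvP2 board h w opp sym score 1 (-1)))))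


theorem pv_foldl_eq (a b init : Int) (F : Int → Int → Int) (g : Int → Int)
    (hF : ∀ s x, a ≤ x → x < b → F s x = s + g x) :
    (PySem.List.pyRange a b).foldl F init = init + pvSum a b g := by
  rw [PySem.List.foldl_congr_mem _ F (fun s x => s + g x) init
      (fun s x hx => hF s x (PySem.List.mem_pyRange_one.mp hx).1 (PySem.List.mem_pyRange_one.mp hx).2)]
  exact PySem.List.foldl_add _ _ _

theorem pvSum_congr (a b : Int) (f g : Int → Int) (h : ∀ x, a ≤ x → x < b → f x = g x) :
    pvSum a b f = pvSum a b g := by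
  unfold pvSum
  congr 1
  exact List.map_congr_left fun x hx =>
    h x (PySem.List.mem_pyRange_one.mp hx).1 (PySem.List.mem_pyRange_one.mp hx).2

theorem pvSum_zero (a b : Int) (f : Int → Int) (h : ∀ x, a ≤ x → x < b → f x = 0) :
    pvSum a b f = 0 := by
  unfold pvSum
  apply List.sum_eq_zero
  intro x hx
  rcases List.mem_map.mp hx with ⟨y, hy, rfl⟩
  exact h y (PySem.List.mem_pyRange_one.mp hy).1 (PySem.List.mem_pyRange_one.mp hy).2

theorem pvSum_add (a b : Int) (f g : Int → Int) :
    pvSum a b (fun x => f x + g x) = pvSum a b f + pvSum a b g :=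
  PySem.List.sum_map_add_int _ _ _

theorem pvSum_mul (a b s : Int) (f : Int → Int) :
    pvSum a b f * s = pvSum a b (fun x => f x * s) :=
  (List.sum_map_mul_right _ _ _).symm

theorem pvSum_shift (a b u : Int) (f : Int → Int) :
    pvSum a b (fun x => f (x - u)) = pvSum (a - u) (b - u) f := by
  unfold pvSum
  rw [PySem.List.pyRange_one, PySem.List.pyRange_one]
  have : (b - u - (a - u)).toNat = (b - a).toNat := by congr 1; ring
  rw [this, List.map_map, List.map_map]
  congr 1
  apply List.map_congr_left
  intro k _
  simp only [Function.comp]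
  congr 1
  ring

theorem pvSum_support (a b a' b' : Int) (f : Int → Int)
    (h : ∀ x, f x ≠ 0 → ((a ≤ x ∧ x < b) ∧ (a' ≤ x ∧ x < b'))) :
    pvSum a b f = pvSum a' b' f := by
  unfold pvSum
  rw [← List.sum_toFinset _ (PySem.List.nodup_pyRange_one a b),
      ← List.sum_toFinset _ (PySem.List.nodup_pyRange_one a' b')]
  rw [← Finset.sum_filter_ne_zero ((PySem.List.pyRange a b).toFinset),
      ← Finset.sum_filter_ne_zero ((PySem.List.pyRange a' b').toFinset)]
  congr 1
  apply Finset.ext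
  intro x
  simp only [Finset.mem_filter, List.mem_toFinset, PySem.List.mem_pyRange_one]
  constructor
  · rintro ⟨_, hne⟩; exact ⟨(h x hne).2, hne⟩
  · rintro ⟨_, hne⟩; exact ⟨(h x hne).1, hne⟩

theorem pvSum_ne_zero (a b : Int) (f : Int → Int) (h : pvSum a b f ≠ 0) :
    ∃ x, a ≤ x ∧ x < b ∧ f x ≠ 0 := by
  by_contra hc
  apply h
  apply pvSum_zero
  intro x hx0 hx1
  by_contra hfx
  exact hc ⟨x, hx0, hx1, hfx⟩

theorem pvSum2_add (rhi clo chi : Int) (f g : Int → Int → Int) :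
    pvSum2 rhi clo chi (fun r c => f r c + g r c) = pvSum2 rhi clo chi f + pvSum2 rhi clo chi g := by
  unfold pvSum2
  rw [← pvSum_add]
  exact pvSum_congr _ _ _ _ (fun r _ _ => pvSum_add _ _ _ _)

theorem pvSum2_congr (rhi clo chi : Int) (f g : Int → Int → Int)
    (h : ∀ r c, 0 ≤ r → r < rhi → clo ≤ c → c < chi → f r c = g r c) :
    pvSum2 rhi clo chi f = pvSum2 rhi clo chi g := by
  unfold pvSum2
  exact pvSum_congr _ _ _ _ (fun r hr0 hr1 =>
    pvSum_congr _ _ _ _ (fun c hc0 hc1 => h r c hr0 hr1 hc0 hc1))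

theorem pvSum2_mul (rhi clo chi s : Int) (f : Int → Int → Int) :
    pvSum2 rhi clo chi f * s = pvSum2 rhi clo chi (fun r c => f r c * s) := by
  unfold pvSum2
  rw [pvSum_mul]
  exact pvSum_congr _ _ _ _ (fun r _ _ => pvSum_mul _ _ _ _)

theorem pvSum2_shift (h w u v : Int) (f : Int → Int → Int)
    (hsupp : ∀ s t, f s t ≠ 0 →
      (0 ≤ s ∧ s < h ∧ 0 ≤ t ∧ t < w) ∧ (0 ≤ s + u ∧ s + u < h ∧ 0 ≤ t + v ∧ t + v < w)) :
    pvSum2 h 0 w (fun r c => f (r - u) (c - v)) = pvSum2 h 0 w f := by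
  unfold pvSum2
  have step1 : ∀ r : Int, pvSum 0 w (fun c => f (r - u) (c - v)) = pvSum 0 w (fun c => f (r - u) c) := by
    intro r
    rw [pvSum_shift 0 w v (f (r - u))]
    apply pvSum_support
    intro t hne
    have := hsupp (r - u) t hne
    exact ⟨⟨by omega, by omega⟩, ⟨this.1.2.2.1, this.1.2.2.2⟩⟩
  rw [pvSum_congr 0 h _ _ (fun r _ _ => step1 r)]
  rw [pvSum_shift 0 h u (fun r => pvSum 0 w (fun c => f r c))]
  apply pvSum_support
  intro s hne
  rcases pvSum_ne_zero _ _ _ hne with ⟨t, _, _, hft⟩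
  have := hsupp s t hft
  exact ⟨⟨by omega, by omega⟩, ⟨this.1.1, this.1.2.1⟩⟩

theorem pvSum2_of_support (rhi clo chi h w : Int) (f : Int → Int → Int)
    (hf : ∀ r c, f r c ≠ 0 →
      ((0 ≤ r ∧ r < h ∧ 0 ≤ c ∧ c < w) ∧ (0 ≤ r ∧ r < rhi ∧ clo ≤ c ∧ c < chi))) :
    pvSum2 rhi clo chi f = pvSum2 h 0 w f := by
  unfold pvSum2
  have inner : ∀ r : Int, pvSum clo chi (fun c => f r c) = pvSum 0 w (fun c => f r c) := by
    intro r
    apply pvSum_support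
    intro c hne
    have := hf r c hne
    exact ⟨⟨this.2.2.2.1, this.2.2.2.2⟩, ⟨this.1.2.2.1, this.1.2.2.2⟩⟩
  rw [pvSum_congr 0 rhi _ _ (fun r _ _ => inner r)]
  apply pvSum_support
  intro r hne
  rcases pvSum_ne_zero _ _ _ hne with ⟨c, _, _, hfc⟩
  have := hf r c hfc
  exact ⟨⟨this.2.1, this.2.2.1⟩, ⟨this.1.1, this.1.2.1⟩⟩

theorem pvF_support (board : List String) (h w : Int) (p0 p1 p2 p3 : String) (score dr dc r c : Int)
    (hne : pvF board h w p0 p1 p2 p3 score dr dc r c ≠ 0) :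
    (0 ≤ r ∧ r < h ∧ 0 ≤ c ∧ c < w) ∧ (0 ≤ r + dr ∧ r + dr < h ∧ 0 ≤ c + dc ∧ c + dc < w)
    ∧ (0 ≤ r + 2*dr ∧ r + 2*dr < h ∧ 0 ≤ c + 2*dc ∧ c + 2*dc < w)
    ∧ (0 ≤ r + 3*dr ∧ r + 3*dr < h ∧ 0 ≤ c + 3*dc ∧ c + 3*dc < w) := by
  unfold pvF at hne
  by_cases hb : (decide (0 ≤ r ∧ r < h ∧ 0 ≤ c ∧ c < w)
      && decide (0 ≤ r + dr ∧ r + dr < h ∧ 0 ≤ c + dc ∧ c + dc < w)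
      && decide (0 ≤ r + 2*dr ∧ r + 2*dr < h ∧ 0 ≤ c + 2*dc ∧ c + 2*dc < w)
      && decide (0 ≤ r + 3*dr ∧ r + 3*dr < h ∧ 0 ≤ c + 3*dc ∧ c + 3*dc < w)
      && (pvCell board r c == p0) && (pvCell board (r + dr) (c + dc) == p1)
      && (pvCell board (r + 2*dr) (c + 2*dc) == p2) && (pvCell board (r + 3*dr) (c + 3*dc) == p3)) = true
  · simp only [Bool.and_eq_true, decide_eq_true_eq] at hb
    exact ⟨hb.1.1.1.1.1.1.1, hb.1.1.1.1.1.1.2, hb.1.1.1.1.1.2, hb.1.1.1.1.2⟩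
  · rw [if_neg (by simpa using hb)] at hne
    exact absurd rfl hne

theorem pv_collapse (P Q : Prop) [Decidable P] [Decidable Q] (t s : Int) :
    (if P then (if Q then t + s else t) else t) = t + (if P ∧ Q then s else 0) := by
  by_cases hP : P
  · by_cases hQ : Q
    · rw [if_pos hP, if_pos hQ, if_pos ⟨hP, hQ⟩]
    · rw [if_pos hP, if_neg hQ, if_neg (fun hpq => hQ hpq.2), add_zero]
  · rw [if_neg hP, if_neg (fun hpq => hP hpq.1), add_zero]

theorem pv_block1_eq (board : List String) (h w : Int) (opp sym : String) (score dr dc r c : Int)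
    (hr0 : 0 ≤ r) (hr1 : r < h) (hc0 : 0 ≤ c) (hc1 : c < w) (hsym : pvCell board r c = sym) :
    (if ([(r - dr, c - dc), (r + dr, c + dc), (r + 2*dr, c + 2*dc)].all
          (fun p => decide (0 ≤ p.1 ∧ p.1 < h ∧ 0 ≤ p.2 ∧ p.2 < w))) = true ∧
        (pvCell board (r - dr) (c - dc) == opp
          && pvCell board (r + dr) (c + dc) == sym
          && pvCell board (r + 2*dr) (c + 2*dc) == ".") = true
      then score else (0:Int))
    = pvP1 board h w opp sym score dr dc (r - dr) (c - dc) := by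
  have e1 : r - dr + dr = r := by ring
  have e2 : r - dr + 2*dr = r + dr := by ring
  have e3 : r - dr + 3*dr = r + 2*dr := by ring
  have f1 : c - dc + dc = c := by ring
  have f2 : c - dc + 2*dc = c + dc := by ring
  have f3 : c - dc + 3*dc = c + 2*dc := by ring
  unfold pvP1 pvF
  rw [e1, e2, e3, f1, f2, f3]
  simp only [List.all_cons, List.all_nil, Bool.and_true, Bool.and_eq_true, decide_eq_true_eq,
    beq_iff_eq]
  refine if_congr ?_ rfl rfl
  constructor
  · rintro ⟨⟨h1, h2, h3⟩, he⟩
    exact ⟨⟨⟨⟨⟨⟨⟨h1, ⟨hr0, hr1, hc0, hc1⟩⟩, h2⟩, h3⟩, he.1.1⟩, hsym⟩, he.1.2⟩, he.2⟩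
  · rintro ⟨⟨⟨⟨⟨⟨⟨h1, _⟩, h2⟩, h3⟩, he0⟩, _⟩, he2⟩, he3⟩
    exact ⟨⟨h1, h2, h3⟩, ⟨he0, he2⟩, he3⟩

theorem pv_block2_eq (board : List String) (h w : Int) (opp sym : String) (score dr dc r c : Int)
    (hr0 : 0 ≤ r) (hr1 : r < h) (hc0 : 0 ≤ c) (hc1 : c < w) (hsym : pvCell board r c = sym) :
    (if ([(r - 2*dr, c - 2*dc), (r - dr, c - dc), (r + dr, c + dc)].all
          (fun p => decide (0 ≤ p.1 ∧ p.1 < h ∧ 0 ≤ p.2 ∧ p.2 < w))) = true ∧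
        (pvCell board (r - 2*dr) (c - 2*dc) == "."
          && pvCell board (r - dr) (c - dc) == sym
          && pvCell board (r + dr) (c + dc) == opp) = true
      then score else (0:Int))
    = pvP2 board h w opp sym score dr dc (r - 2*dr) (c - 2*dc) := by
  have e1 : r - 2*dr + dr = r - dr := by ring
  have e2 : r - 2*dr + 2*dr = r := by ring
  have e3 : r - 2*dr + 3*dr = r + dr := by ring
  have f1 : c - 2*dc + dc = c - dc := by ring
  have f2 : c - 2*dc + 2*dc = c := by ring
  have f3 : c - 2*dc + 3*dc = c + dc := by ring
  unfold pvP2 pvF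
  rw [e1, e2, e3, f1, f2, f3]
  simp only [List.all_cons, List.all_nil, Bool.and_true, Bool.and_eq_true, decide_eq_true_eq,
    beq_iff_eq]
  refine if_congr ?_ rfl rfl
  constructor
  · rintro ⟨⟨h0, h1, h3⟩, he⟩
    exact ⟨⟨⟨⟨⟨⟨⟨h0, h1⟩, ⟨hr0, hr1, hc0, hc1⟩⟩, h3⟩, he.1.1⟩, he.1.2⟩, hsym⟩, he.2⟩
  · rintro ⟨⟨⟨⟨⟨⟨⟨h0, h1⟩, _⟩, h3⟩, he0⟩, he1⟩, _⟩, he3⟩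
    exact ⟨⟨h0, h1, h3⟩, ⟨he0, he1⟩, he3⟩

theorem pvP1_zero (board : List String) (h w : Int) (opp sym : String) (score dr dc r c : Int)
    (hsym : pvCell board r c ≠ sym) :
    pvP1 board h w opp sym score dr dc (r - dr) (c - dc) = 0 := by
  unfold pvP1 pvF
  rw [if_neg]
  intro hcond
  simp only [Bool.and_eq_true, decide_eq_true_eq, beq_iff_eq] at hcond
  have := hcond.1.1.2
  rw [show r - dr + dr = r from by ring, show c - dc + dc = c from by ring] at this
  exact hsym this

theorem pvP2_zero (board : List String) (h w : Int) (opp sym : String) (score dr dc r c : Int)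
    (hsym : pvCell board r c ≠ sym) :
    pvP2 board h w opp sym score dr dc (r - 2*dr) (c - 2*dc) = 0 := by
  unfold pvP2 pvF
  rw [if_neg]
  intro hcond
  simp only [Bool.and_eq_true, decide_eq_true_eq, beq_iff_eq] at hcond
  have := hcond.1.2
  rw [show r - 2*dr + 2*dr = r from by ring, show c - 2*dc + 2*dc = c from by ring] at this
  exact hsym this

theorem pv_dir_step (board : List String) (h w : Int) (opp sym : String) (score : Int)
    (r c : Int) (hr0 : 0 ≤ r) (hr1 : r < h) (hc0 : 0 ≤ c) (hc1 : c < w)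
    (hsym : pvCell board r c = sym) (x : Int) (d : Int × Int) :
    (if [(r - 2*d.1, c - 2*d.2), (r - d.1, c - d.2), (r + d.1, c + d.2)].all
          (fun p => decide (0 ≤ p.1 ∧ p.1 < h ∧ 0 ≤ p.2 ∧ p.2 < w)) then
        if pvCell board (r - 2*d.1) (c - 2*d.2) == "."
            && pvCell board (r - d.1) (c - d.2) == sym
            && pvCell board (r + d.1) (c + d.2) == opp then
          (if [(r - d.1, c - d.2), (r + d.1, c + d.2), (r + 2*d.1, c + 2*d.2)].all
                (fun p => decide (0 ≤ p.1 ∧ p.1 < h ∧ 0 ≤ p.2 ∧ p.2 < w)) then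
              if pvCell board (r - d.1) (c - d.2) == opp
                  && pvCell board (r + d.1) (c + d.2) == sym
                  && pvCell board (r + 2*d.1) (c + 2*d.2) == "." then
                x + score
              else x
            else x) + score
        else
          (if [(r - d.1, c - d.2), (r + d.1, c + d.2), (r + 2*d.1, c + 2*d.2)].all
                (fun p => decide (0 ≤ p.1 ∧ p.1 < h ∧ 0 ≤ p.2 ∧ p.2 < w)) then
              if pvCell board (r - d.1) (c - d.2) == opp
                  && pvCell board (r + d.1) (c + d.2) == sym
                  && pvCell board (r + 2*d.1) (c + 2*d.2) == "." then
                x + score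
              else x
            else x)
      else
        (if [(r - d.1, c - d.2), (r + d.1, c + d.2), (r + 2*d.1, c + 2*d.2)].all
              (fun p => decide (0 ≤ p.1 ∧ p.1 < h ∧ 0 ≤ p.2 ∧ p.2 < w)) then
            if pvCell board (r - d.1) (c - d.2) == opp
                && pvCell board (r + d.1) (c + d.2) == sym
                && pvCell board (r + 2*d.1) (c + 2*d.2) == "." then
              x + score
            else x
          else x))
    = x + pvDirTerm board h w opp sym score d r c := by
  rw [pv_collapse _ _ x score, pv_collapse _ _ (x + _) score,
    pv_block1_eq board h w opp sym score d.1 d.2 r c hr0 hr1 hc0 hc1 hsym,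
    pv_block2_eq board h w opp sym score d.1 d.2 r c hr0 hr1 hc0 hc1 hsym]
  unfold pvDirTerm
  ring

theorem pv_cell_body (board : List String) (h w : Int) (opp sym : String) (score : Int)
    (r c x : Int) (hr0 : 0 ≤ r) (hr1 : r < h) (hc0 : 0 ≤ c) (hc1 : c < w) :
    (if pvCell board r c != sym then x
     else ([(1, 0), (0, 1), (1, 1), (1, -1)] : List (Int × Int)).foldl (fun risk d =>
       if [(r - 2*d.1, c - 2*d.2), (r - d.1, c - d.2), (r + d.1, c + d.2)].all
            (fun p => decide (0 ≤ p.1 ∧ p.1 < h ∧ 0 ≤ p.2 ∧ p.2 < w)) then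
          if pvCell board (r - 2*d.1) (c - 2*d.2) == "."
              && pvCell board (r - d.1) (c - d.2) == sym
              && pvCell board (r + d.1) (c + d.2) == opp then
            (if [(r - d.1, c - d.2), (r + d.1, c + d.2), (r + 2*d.1, c + 2*d.2)].all
                  (fun p => decide (0 ≤ p.1 ∧ p.1 < h ∧ 0 ≤ p.2 ∧ p.2 < w)) then
                if pvCell board (r - d.1) (c - d.2) == opp
                    && pvCell board (r + d.1) (c + d.2) == sym
                    && pvCell board (r + 2*d.1) (c + 2*d.2) == "." then
                  risk + score
                else risk
              else risk) + score
          else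
            (if [(r - d.1, c - d.2), (r + d.1, c + d.2), (r + 2*d.1, c + 2*d.2)].all
                  (fun p => decide (0 ≤ p.1 ∧ p.1 < h ∧ 0 ≤ p.2 ∧ p.2 < w)) then
                if pvCell board (r - d.1) (c - d.2) == opp
                    && pvCell board (r + d.1) (c + d.2) == sym
                    && pvCell board (r + 2*d.1) (c + 2*d.2) == "." then
                  risk + score
                else risk
              else risk)
        else
          (if [(r - d.1, c - d.2), (r + d.1, c + d.2), (r + 2*d.1, c + 2*d.2)].all
                (fun p => decide (0 ≤ p.1 ∧ p.1 < h ∧ 0 ≤ p.2 ∧ p.2 < w)) then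
              if pvCell board (r - d.1) (c - d.2) == opp
                  && pvCell board (r + d.1) (c + d.2) == sym
                  && pvCell board (r + 2*d.1) (c + 2*d.2) == "." then
                risk + score
              else risk
            else risk)) x)
    = x + pvGA board h w opp sym score r c := by
  by_cases hsym : pvCell board r c = sym
  · rw [if_neg (by simp [hsym])]
    rw [PySem.List.foldl_congr_mem _ _
        (fun acc d => acc + pvDirTerm board h w opp sym score d r c) x
        (fun acc d _ => pv_dir_step board h w opp sym score r c hr0 hr1 hc0 hc1 hsym acc d)]
    rw [PySem.List.foldl_add]
    rfl
  · rw [if_pos (by simp [hsym])]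
    have z : ∀ d : Int × Int, pvDirTerm board h w opp sym score d r c = 0 := by
      intro d
      unfold pvDirTerm
      rw [pvP1_zero board h w opp sym score d.1 d.2 r c hsym,
          pvP2_zero board h w opp sym score d.1 d.2 r c hsym]
      ring
    have h4 : pvGA board h w opp sym score r c = 0 := by
      unfold pvGA
      simp [z]
    rw [h4, add_zero]

theorem pv_A_loops (board : List String) (h w : Int) (opp sym : String) (score : Int) :
    (PySem.List.pyRange 0 h).foldl (fun risk r =>
      (PySem.List.pyRange 0 w).foldl (fun risk c =>
        if pvCell board r c != sym then risk
        else ([(1, 0), (0, 1), (1, 1), (1, -1)] : List (Int × Int)).foldl (fun risk d =>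
          if [(r - 2*d.1, c - 2*d.2), (r - d.1, c - d.2), (r + d.1, c + d.2)].all
               (fun p => decide (0 ≤ p.1 ∧ p.1 < h ∧ 0 ≤ p.2 ∧ p.2 < w)) then
             if pvCell board (r - 2*d.1) (c - 2*d.2) == "."
                 && pvCell board (r - d.1) (c - d.2) == sym
                 && pvCell board (r + d.1) (c + d.2) == opp then
               (if [(r - d.1, c - d.2), (r + d.1, c + d.2), (r + 2*d.1, c + 2*d.2)].all
                     (fun p => decide (0 ≤ p.1 ∧ p.1 < h ∧ 0 ≤ p.2 ∧ p.2 < w)) then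
                   if pvCell board (r - d.1) (c - d.2) == opp
                       && pvCell board (r + d.1) (c + d.2) == sym
                       && pvCell board (r + 2*d.1) (c + 2*d.2) == "." then
                     risk + score
                   else risk
                 else risk) + score
             else
               (if [(r - d.1, c - d.2), (r + d.1, c + d.2), (r + 2*d.1, c + 2*d.2)].all
                     (fun p => decide (0 ≤ p.1 ∧ p.1 < h ∧ 0 ≤ p.2 ∧ p.2 < w)) then
                   if pvCell board (r - d.1) (c - d.2) == opp
                       && pvCell board (r + d.1) (c + d.2) == sym
                       && pvCell board (r + 2*d.1) (c + 2*d.2) == "." then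
                     risk + score
                   else risk
                 else risk)
           else
             (if [(r - d.1, c - d.2), (r + d.1, c + d.2), (r + 2*d.1, c + 2*d.2)].all
                   (fun p => decide (0 ≤ p.1 ∧ p.1 < h ∧ 0 ≤ p.2 ∧ p.2 < w)) then
                 if pvCell board (r - d.1) (c - d.2) == opp
                     && pvCell board (r + d.1) (c + d.2) == sym
                     && pvCell board (r + 2*d.1) (c + 2*d.2) == "." then
                   risk + score
                 else risk
               else risk)) risk) risk) 0
    = pvSum2 h 0 w (pvGA board h w opp sym score) := by
  rw [pv_foldl_eq 0 h 0 _ (fun r => pvSum 0 w (fun c => pvGA board h w opp sym score r c))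
      (fun s r hr0 hr1 =>
        pv_foldl_eq 0 w s _ _
          (fun s' c hc0 hc1 => pv_cell_body board h w opp sym score r c s' hr0 hr1 hc0 hc1))]
  rw [zero_add]
  rfl

theorem pv_dir_sum (board : List String) (h w : Int) (opp sym : String) (score dr dc : Int) :
    pvSum2 h 0 w (fun r c => pvDirTerm board h w opp sym score (dr, dc) r c)
    = pvSum2 h 0 w (pvP1 board h w opp sym score dr dc)
      + pvSum2 h 0 w (pvP2 board h w opp sym score dr dc) := by
  have e : (fun r c => pvDirTerm board h w opp sym score (dr, dc) r c)
      = fun r c => pvP1 board h w opp sym score dr dc (r - dr) (c - dc)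
          + pvP2 board h w opp sym score dr dc (r - 2*dr) (c - 2*dc) := rfl
  rw [e, pvSum2_add h 0 w
      (fun r c => pvP1 board h w opp sym score dr dc (r - dr) (c - dc))
      (fun r c => pvP2 board h w opp sym score dr dc (r - 2*dr) (c - 2*dc))]
  congr 1
  · exact pvSum2_shift h w dr dc (pvP1 board h w opp sym score dr dc)
      (fun s t hne => ⟨(pvF_support board h w _ _ _ _ score dr dc s t hne).1,
        (pvF_support board h w _ _ _ _ score dr dc s t hne).2.1⟩)
  · exact pvSum2_shift h w (2*dr) (2*dc) (pvP2 board h w opp sym score dr dc)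
      (fun s t hne => ⟨(pvF_support board h w _ _ _ _ score dr dc s t hne).1,
        (pvF_support board h w _ _ _ _ score dr dc s t hne).2.2.1⟩)

theorem pv_GA_sum (board : List String) (h w : Int) (opp sym : String) (score : Int) :
    pvSum2 h 0 w (pvGA board h w opp sym score) = pvCanon board h w opp sym score := by
  have e : pvGA board h w opp sym score = fun r c =>
      pvDirTerm board h w opp sym score (1, 0) r c
      + (pvDirTerm board h w opp sym score (0, 1) r c
      + (pvDirTerm board h w opp sym score (1, 1) r c
      + pvDirTerm board h w opp sym score (1, -1) r c)) := by
    funext r c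
    simp [pvGA]
  rw [e]
  rw [pvSum2_add h 0 w (fun r c => pvDirTerm board h w opp sym score (1, 0) r c)
      (fun r c => pvDirTerm board h w opp sym score (0, 1) r c
        + (pvDirTerm board h w opp sym score (1, 1) r c
        + pvDirTerm board h w opp sym score (1, -1) r c))]
  rw [pvSum2_add h 0 w (fun r c => pvDirTerm board h w opp sym score (0, 1) r c)
      (fun r c => pvDirTerm board h w opp sym score (1, 1) r c
        + pvDirTerm board h w opp sym score (1, -1) r c)]
  rw [pvSum2_add h 0 w (fun r c => pvDirTerm board h w opp sym score (1, 1) r c)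
      (fun r c => pvDirTerm board h w opp sym score (1, -1) r c)]
  rw [pv_dir_sum board h w opp sym score 1 0, pv_dir_sum board h w opp sym score 0 1,
      pv_dir_sum board h w opp sym score 1 1, pv_dir_sum board h w opp sym score 1 (-1)]
  unfold pvCanon
  ring

theorem pv_window_eq (board : List String) (h w : Int) (opp sym : String) (score dr dc r c : Int)
    (hopp : opp ≠ ".")
    (hin1 : 0 ≤ r ∧ r < h ∧ 0 ≤ c ∧ c < w)
    (hin2 : 0 ≤ r + dr ∧ r + dr < h ∧ 0 ≤ c + dc ∧ c + dc < w)
    (hin3 : 0 ≤ r + 2*dr ∧ r + 2*dr < h ∧ 0 ≤ c + 2*dc ∧ c + 2*dc < w)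
    (hin4 : 0 ≤ r + 3*dr ∧ r + 3*dr < h ∧ 0 ≤ c + 3*dc ∧ c + 3*dc < w) :
    (if ([(opp, sym, sym, "."), (".", sym, sym, opp)] :
          List (String × String × String × String)).contains
        (pvCell board r c, pvCell board (r + dr) (c + dc),
         pvCell board (r + 2*dr) (c + 2*dc), pvCell board (r + 3*dr) (c + 3*dc)) then (1:Int)
      else 0) * score
    = pvP1 board h w opp sym score dr dc r c + pvP2 board h w opp sym score dr dc r c := by
  unfold pvP1 pvP2 pvF
  by_cases hE1 : pvCell board r c = opp ∧ pvCell board (r + dr) (c + dc) = sym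
      ∧ pvCell board (r + 2*dr) (c + 2*dc) = sym ∧ pvCell board (r + 3*dr) (c + 3*dc) = "."
  · by_cases hE2 : pvCell board r c = "." ∧ pvCell board (r + dr) (c + dc) = sym
        ∧ pvCell board (r + 2*dr) (c + 2*dc) = sym ∧ pvCell board (r + 3*dr) (c + 3*dc) = opp
    · exact absurd (hE1.1.symm.trans hE2.1) hopp
    · rw [if_pos (by
          rw [List.contains_eq_mem]
          exact decide_eq_true (by
            rw [hE1.1, hE1.2.1, hE1.2.2.1, hE1.2.2.2]
            exact List.mem_cons_self)),
        if_pos (by simp [hin1, hin2, hin3, hin4, hE1.1, hE1.2.1, hE1.2.2.1, hE1.2.2.2]),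
        if_neg (by
          simp only [Bool.and_eq_true, decide_eq_true_eq, beq_iff_eq]
          rintro ⟨⟨⟨⟨_, he0⟩, he1⟩, he2⟩, he3⟩
          exact hE2 ⟨he0, he1, he2, he3⟩)]
      ring
  · by_cases hE2 : pvCell board r c = "." ∧ pvCell board (r + dr) (c + dc) = sym
        ∧ pvCell board (r + 2*dr) (c + 2*dc) = sym ∧ pvCell board (r + 3*dr) (c + 3*dc) = opp
    · rw [if_pos (by
          rw [List.contains_eq_mem]
          exact decide_eq_true (by
            rw [hE2.1, hE2.2.1, hE2.2.2.1, hE2.2.2.2]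
            exact List.mem_cons_of_mem _ List.mem_cons_self)),
        if_neg (by
          simp only [Bool.and_eq_true, decide_eq_true_eq, beq_iff_eq]
          rintro ⟨⟨⟨⟨_, he0⟩, he1⟩, he2⟩, he3⟩
          exact hE1 ⟨he0, he1, he2, he3⟩),
        if_pos (by simp [hin1, hin2, hin3, hin4, hE2.1, hE2.2.1, hE2.2.2.1, hE2.2.2.2])]
      ring
    · rw [if_neg (by
          simp only [List.contains_eq_mem, List.mem_cons, List.not_mem_nil, or_false,
            decide_eq_true_eq, Prod.mk.injEq]
          rintro (⟨a0, a1, a2, a3⟩ | ⟨a0, a1, a2, a3⟩)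
          · exact hE1 ⟨a0, a1, a2, a3⟩
          · exact hE2 ⟨a0, a1, a2, a3⟩),
        if_neg (by
          simp only [Bool.and_eq_true, decide_eq_true_eq, beq_iff_eq]
          rintro ⟨⟨⟨⟨_, he0⟩, he1⟩, he2⟩, he3⟩
          exact hE1 ⟨he0, he1, he2, he3⟩),
        if_neg (by
          simp only [Bool.and_eq_true, decide_eq_true_eq, beq_iff_eq]
          rintro ⟨⟨⟨⟨_, he0⟩, he1⟩, he2⟩, he3⟩
          exact hE2 ⟨he0, he1, he2, he3⟩)]
      ring

theorem pv_cnt_collapse (P : Prop) [Decidable P] (x : Int) :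
    (if P then x + 1 else x) = x + (if P then (1:Int) else 0) := by
  by_cases hP : P
  · rw [if_pos hP, if_pos hP]
  · rw [if_neg hP, if_neg hP, add_zero]

theorem pv_B_dir (board : List String) (h w : Int) (opp sym : String) (score dr dc rhi clo chi : Int)
    (hopp : opp ≠ ".")
    (hin : ∀ r c, 0 ≤ r → r < rhi → clo ≤ c → c < chi →
      ((0 ≤ r ∧ r < h ∧ 0 ≤ c ∧ c < w) ∧ (0 ≤ r + dr ∧ r + dr < h ∧ 0 ≤ c + dc ∧ c + dc < w)
      ∧ (0 ≤ r + 2*dr ∧ r + 2*dr < h ∧ 0 ≤ c + 2*dc ∧ c + 2*dc < w)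
      ∧ (0 ≤ r + 3*dr ∧ r + 3*dr < h ∧ 0 ≤ c + 3*dc ∧ c + 3*dc < w)))
    (hsup : ∀ r c,
      ((0 ≤ r ∧ r < h ∧ 0 ≤ c ∧ c < w) ∧ (0 ≤ r + dr ∧ r + dr < h ∧ 0 ≤ c + dc ∧ c + dc < w)
      ∧ (0 ≤ r + 2*dr ∧ r + 2*dr < h ∧ 0 ≤ c + 2*dc ∧ c + 2*dc < w)
      ∧ (0 ≤ r + 3*dr ∧ r + 3*dr < h ∧ 0 ≤ c + 3*dc ∧ c + 3*dc < w)) →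
      (0 ≤ r ∧ r < rhi ∧ clo ≤ c ∧ c < chi)) :
    pvSum2 rhi clo chi (fun r c =>
      if ([(opp, sym, sym, "."), (".", sym, sym, opp)] :
            List (String × String × String × String)).contains
          (pvCell board r c, pvCell board (r + dr) (c + dc),
           pvCell board (r + 2*dr) (c + 2*dc), pvCell board (r + 3*dr) (c + 3*dc)) then (1:Int)
        else 0) * score
    = pvSum2 h 0 w (pvP1 board h w opp sym score dr dc)
      + pvSum2 h 0 w (pvP2 board h w opp sym score dr dc) := by
  rw [pvSum2_mul]
  rw [pvSum2_congr rhi clo chi _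
      (fun r c => pvP1 board h w opp sym score dr dc r c + pvP2 board h w opp sym score dr dc r c)
      (fun r c hr0 hr1 hc0 hc1 =>
        pv_window_eq board h w opp sym score dr dc r c hopp
          (hin r c hr0 hr1 hc0 hc1).1 (hin r c hr0 hr1 hc0 hc1).2.1
          (hin r c hr0 hr1 hc0 hc1).2.2.1 (hin r c hr0 hr1 hc0 hc1).2.2.2)]
  rw [pvSum2_add rhi clo chi (pvP1 board h w opp sym score dr dc)
      (pvP2 board h w opp sym score dr dc)]
  congr 1
  · exact pvSum2_of_support rhi clo chi h w (pvP1 board h w opp sym score dr dc)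
      (fun r c hne =>
        have hs := pvF_support board h w _ _ _ _ score dr dc r c hne
        ⟨hs.1, hsup r c hs⟩)
  · exact pvSum2_of_support rhi clo chi h w (pvP2 board h w opp sym score dr dc)
      (fun r c hne =>
        have hs := pvF_support board h w _ _ _ _ score dr dc r c hne
        ⟨hs.1, hsup r c hs⟩)

theorem pv_B_loops (board : List String) (h w : Int) (opp sym : String) (score : Int)
    (hopp : opp ≠ ".") :
    (([(1, 0), (0, 1), (1, 1), (1, -1)] : List (Int × Int)).foldl (fun hits d =>
      (PySem.List.pyRange 0 (h - 3 * d.1)).foldl (fun hits r =>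
        (PySem.List.pyRange (if d.2 < 0 then 3 else 0) (if d.2 < 0 then w else w - 3 * d.2)).foldl
          (fun hits c =>
            if ([(opp, sym, sym, "."), (".", sym, sym, opp)] :
                  List (String × String × String × String)).contains
                (pvCell board r c, pvCell board (r + d.1) (c + d.2),
                 pvCell board (r + 2*d.1) (c + 2*d.2), pvCell board (r + 3*d.1) (c + 3*d.2)) then
              hits + 1
            else hits) hits) hits) 0) * score
    = pvCanon board h w opp sym score := by
  have hH : ∀ (dr dc x : Int),
      (PySem.List.pyRange 0 (h - 3 * dr)).foldl (fun hits r =>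
        (PySem.List.pyRange (if dc < 0 then 3 else 0) (if dc < 0 then w else w - 3 * dc)).foldl
          (fun hits c =>
            if ([(opp, sym, sym, "."), (".", sym, sym, opp)] :
                  List (String × String × String × String)).contains
                (pvCell board r c, pvCell board (r + dr) (c + dc),
                 pvCell board (r + 2*dr) (c + 2*dc), pvCell board (r + 3*dr) (c + 3*dc)) then
              hits + 1
            else hits) hits) x
      = x + pvSum2 (h - 3 * dr) (if dc < 0 then 3 else 0) (if dc < 0 then w else w - 3 * dc)
          (fun r c =>
            if ([(opp, sym, sym, "."), (".", sym, sym, opp)] :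
                  List (String × String × String × String)).contains
                (pvCell board r c, pvCell board (r + dr) (c + dc),
                 pvCell board (r + 2*dr) (c + 2*dc), pvCell board (r + 3*dr) (c + 3*dc)) then
              (1:Int)
            else 0) := by
    intro dr dc x
    exact pv_foldl_eq _ _ x _ _ (fun s r _ _ =>
      pv_foldl_eq _ _ s _ _ (fun s' c _ _ => pv_cnt_collapse _ s'))
  simp only [List.foldl_cons, List.foldl_nil]
  rw [hH, hH, hH, hH]
  have h1 := pv_B_dir board h w opp sym score 1 0 (h - 3) 0 w hopp
    (by intro r c h1 h2 h3 h4; omega) (by intro r c hc; omega)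
  have h2 := pv_B_dir board h w opp sym score 0 1 h 0 (w - 3) hopp
    (by intro r c h1 h2 h3 h4; omega) (by intro r c hc; omega)
  have h3 := pv_B_dir board h w opp sym score 1 1 (h - 3) 0 (w - 3) hopp
    (by intro r c h1 h2 h3 h4; omega) (by intro r c hc; omega)
  have h4 := pv_B_dir board h w opp sym score 1 (-1) (h - 3) 3 w hopp
    (by intro r c h1 h2 h3 h4; omega) (by intro r c hc; omega)
  norm_num at h1 h2 h3 h4 ⊢
  rw [add_mul, add_mul, add_mul, h1, h2, h3, h4]
  unfold pvCanon
  ring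

-- ===== VERDICT (by name: the statement is the Claim_ definition above) =====
set_option maxHeartbeats 2000000 in
theorem evaluate_capture_risk_spec : Claim_equal_evaluate_capture_risk := by
  intro board symbol oc hdom hpre
  unfold Spec_evaluate_capture_risk
  have hopp : (if symbol == "2" then "1" else "2") ≠ ("." : String) := by
    split_ifs <;> decide
  cases board with
  | nil =>
    have hwlen : pvRowLen ([] : List String) 0 = 0 := rfl
    refine ((pv_A_loops ([] : List String) ((List.length ([] : List String) : Int)) (pvRowLen ([] : List String) 0) (if symbol == "2" then "1" else "2") symbol (if oc ≥ (([150, 500, 2000, 6000, 999999] : List Int).length : Int) then (PySem.List.pyGet? ([150, 500, 2000, 6000, 999999] : List Int) (-1)).getD 0 else (PySem.List.pyGet? ([150, 500, 2000, 6000, 999999] : List Int) oc).getD 0)).trans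
      (pv_GA_sum ([] : List String) ((List.length ([] : List String) : Int)) (pvRowLen ([] : List String) 0) (if symbol == "2" then "1" else "2") symbol (if oc ≥ (([150, 500, 2000, 6000, 999999] : List Int).length : Int) then (PySem.List.pyGet? ([150, 500, 2000, 6000, 999999] : List Int) (-1)).getD 0 else (PySem.List.pyGet? ([150, 500, 2000, 6000, 999999] : List Int) oc).getD 0))).trans ?_
    rw [hwlen]
    exact (pv_B_loops ([] : List String) ((List.length ([] : List String) : Int)) 0 (if symbol == "2" then "1" else "2") symbol (if oc ≥ (([150, 500, 2000, 6000, 999999] : List Int).length : Int) then (PySem.List.pyGet? ([150, 500, 2000, 6000, 999999] : List Int) (-1)).getD 0 else (PySem.List.pyGet? ([150, 500, 2000, 6000, 999999] : List Int) oc).getD 0) hopp).symm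
  | cons row rest =>
    have hwlen : pvRowLen (row :: rest) 0 = PySem.Str.len row := by
      simp [pvRowLen]
    refine ((pv_A_loops (row :: rest) ((List.length (row :: rest) : Int)) (pvRowLen (row :: rest) 0) (if symbol == "2" then "1" else "2") symbol (if oc ≥ (([150, 500, 2000, 6000, 999999] : List Int).length : Int) then (PySem.List.pyGet? ([150, 500, 2000, 6000, 999999] : List Int) (-1)).getD 0 else (PySem.List.pyGet? ([150, 500, 2000, 6000, 999999] : List Int) oc).getD 0)).trans
      (pv_GA_sum (row :: rest) ((List.length (row :: rest) : Int)) (pvRowLen (row :: rest) 0) (if symbol == "2" then "1" else "2") symbol (if oc ≥ (([150, 500, 2000, 6000, 999999] : List Int).length : Int) then (PySem.List.pyGet? ([150, 500, 2000, 6000, 999999] : List Int) (-1)).getD 0 else (PySem.List.pyGet? ([150, 500, 2000, 6000, 999999] : List Int) oc).getD 0))).trans ?_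
    rw [hwlen]
    exact (pv_B_loops (row :: rest) ((List.length (row :: rest) : Int)) (PySem.Str.len row) (if symbol == "2" then "1" else "2") symbol (if oc ≥ (([150, 500, 2000, 6000, 999999] : List Int).length : Int) then (PySem.List.pyGet? ([150, 500, 2000, 6000, 999999] : List Int) (-1)).getD 0 else (PySem.List.pyGet? ([150, 500, 2000, 6000, 999999] : List Int) oc).getD 0) hopp).symm
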